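-- pv_equiv track=rewrite | github.com/slavah8/leetcode | 0519-widest-pair-of-indices-with-equal-range-sum/0519-widest-pair-of-indices-with-equal-range-sum.py | widestPairOfIndices
-- ===== SOURCE A (Python) =====
-- from typing import List
--
-- def widestPairOfIndices(nums1: List[int], nums2: List[int]) -> int:
--     N = len(nums1)
--     earliest_index = {0 : 0}
--
--     widest_length = 0
--     prefix_sum = 0
--     for idx in range(1, N + 1):
--         diff = nums1[idx - 1] - nums2[idx - 1]
--         prefix_sum += diff
--
--         if prefix_sum not in earliest_index:
--             earliest_index[prefix_sum] = idx
--         else: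
--             # we've seen this sum before so we can take the range
--             L = earliest_index[prefix_sum]
--             length = idx - L
--             widest_length = max(widest_length, length)
--
--     return widest_length
-- ===== SOURCE B (Python) =====
-- from typing import List
--
-- def widestPairOfIndices(nums1: List[int], nums2: List[int]) -> int:
--     # prefix-difference values P[0..N]: P[k] = sum(nums1[:k]) - sum(nums2[:k])
--     prefixes = [0]
--     for a, b in zip(nums1, nums2):
--         prefixes.append(prefixes[-1] + (a - b))
--     # sort the (value, index) pairs: equal values become adjacent runs,
--     # and within a run the indices are ascending
--     pairs = sorted((p, i) for i, p in enumerate(prefixes))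
--     # one scan over the sorted runs: widest gap to each run's first index
--     best = 0
--     run_value, run_first = pairs[0]
--     for p, i in pairs[1:]:
--         if p == run_value:
--             best = max(best, i - run_first)
--         else:
--             run_value, run_first = p, i
--     return best
-- ===== Notes on version B (the rewrite author's own statement) =====
-- stated objective: alternative
-- what changed: A finds the widest equal-prefix pair online with a hash map from each prefix-difference value to its earliest index; B uses no hash map at all: it materialises the prefix list, sorts the (value, index) pairs so equal values become adjacent runs with ascending indices, and takes the widest gap to each run's first index in one scan (sort-then-scan, O(n log n), instead of hashing, O(n)).
import Mathlib
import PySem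

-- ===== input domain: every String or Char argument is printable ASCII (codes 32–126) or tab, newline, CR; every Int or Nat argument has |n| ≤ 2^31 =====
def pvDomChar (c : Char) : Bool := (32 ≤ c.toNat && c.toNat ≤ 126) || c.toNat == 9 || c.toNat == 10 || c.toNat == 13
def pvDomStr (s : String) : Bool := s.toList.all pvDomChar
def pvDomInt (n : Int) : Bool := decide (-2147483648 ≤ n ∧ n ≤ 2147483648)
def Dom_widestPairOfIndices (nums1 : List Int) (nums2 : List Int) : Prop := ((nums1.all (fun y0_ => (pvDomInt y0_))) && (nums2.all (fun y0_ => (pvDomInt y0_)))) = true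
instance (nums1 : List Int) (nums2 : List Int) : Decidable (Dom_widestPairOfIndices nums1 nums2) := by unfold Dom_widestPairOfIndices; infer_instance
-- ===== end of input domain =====

-- B drops A's hash map entirely: it materialises the prefix-difference list, sorts the
-- (value, index) pairs so equal values become adjacent runs with ascending indices, and takes
-- the widest gap to each run's first index in one scan — sort-then-scan instead of hashing
-- ('alternative'; O(n log n) vs A's O(n)).

-- ===== PORT A =====
-- one step of A's `for idx in range(1, N + 1)` loop; state = (earliest_index, widest_length, prefix_sum)
def stepA (nums1 : List Int) (nums2 : List Int)
    (s : PySem.Dict Int Int × Int × Int) (idx : Int) : PySem.Dict Int Int × Int × Int :=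
  let diff := (PySem.List.pyGet? nums1 (idx - 1)).getD 0 - (PySem.List.pyGet? nums2 (idx - 1)).getD 0
  let p := s.2.2 + diff
  -- `if prefix_sum not in earliest_index: … else: …` (getD default never used under Pre_)
  match s.1.get? p with
  | none => (s.1.insert p idx, s.2.1, p)
  | some L => (s.1, max s.2.1 (idx - L), p)

def widestPairOfIndices (nums1 : List Int) (nums2 : List Int) : Int :=
  ((PySem.List.pyRange 1 ((nums1.length : Int) + 1) 1).foldl (stepA nums1 nums2)
    (PySem.Dict.ofList [(0, 0)], 0, 0)).2.1

-- ===== PORT B =====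
-- `prefixes = [0]; for a, b in zip(...): prefixes.append(prefixes[-1] + (a - b))`
def buildPrefixes (zs : List (Int × Int)) : List Int :=
  zs.foldl (fun acc ab => acc ++ [PySem.List.pyGetD acc (-1) 0 + (ab.1 - ab.2)]) [0]

def widestPairOfIndices_alt (nums1 : List Int) (nums2 : List Int) : Int :=
  -- `pairs = sorted((p, i) for i, p in enumerate(prefixes))` (tuple order: value, then index)
  match PySem.List.sorted2
      ((PySem.List.enumerate (buildPrefixes (nums1.zip nums2))).map (fun ip => (ip.2, ip.1)))
      (fun x => x.1) (fun x => x.2) false with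
  | [] => 0   -- unreachable: `prefixes` always contains the seed 0, so `pairs[0]` never raises
  | (v, f) :: rest =>
      -- `for p, i in pairs[1:]: …`; state = (best, run_value, run_first)
      (rest.foldl (fun s x =>
          if x.1 == s.2.1 then (max s.1 (x.2 - s.2.2), s.2.1, s.2.2)
          else (s.1, x.1, x.2)) (0, v, f)).1

-- ===== PRECONDITION & SPEC =====
-- Pre_ excludes only the inputs where A raises IndexError (nums2 shorter than nums1).
def Pre_widestPairOfIndices (nums1 : List Int) (nums2 : List Int) : Prop :=
  nums1.length ≤ nums2.length
instance (nums1 : List Int) (nums2 : List Int) : Decidable (Pre_widestPairOfIndices nums1 nums2) := by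
  unfold Pre_widestPairOfIndices; infer_instance
def pvWitness_widestPairOfIndices : List Int × List Int := ([1, 2, 1], [2, 1, 1])

def Spec_widestPairOfIndices (nums1 : List Int) (nums2 : List Int) (out : Int) : Prop :=
  out = widestPairOfIndices_alt nums1 nums2
instance (nums1 : List Int) (nums2 : List Int) (out : Int) : Decidable (Spec_widestPairOfIndices nums1 nums2 out) := by
  unfold Spec_widestPairOfIndices; infer_instance

-- ===== CLAIM (what is proved, stated in full; the proofs are below) =====
def Claim_equal_widestPairOfIndices : Prop := ∀ (nums1 : List Int) (nums2 : List Int), Dom_widestPairOfIndices nums1 nums2 → Pre_widestPairOfIndices nums1 nums2 → Spec_widestPairOfIndices nums1 nums2 (widestPairOfIndices nums1 nums2)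

-- ===== LEMMAS AND PROOFS =====

-- Python's tuple order on (value, index) pairs, as a (total, transitive) relation.
def lexLe (a b : Int × Int) : Prop := a.1 < b.1 ∨ (a.1 = b.1 ∧ a.2 ≤ b.2)

-- the (value, index) pairs of a prefix list, in index order, indices starting at i
def Qaux : List Int → Int → List (Int × Int)
  | [], _ => []
  | p :: ps, i => (p, i) :: Qaux ps (i + 1)

-- index of the first occurrence of value v in a pair list
def firstAt (v : Int) (l : List (Int × Int)) : Option Int :=
  (l.find? (fun y => y.1 == v)).map (fun y => y.2)

-- the prefix values A's loop will traverse from current prefix p over remaining pairs zs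
def ext : Int → List (Int × Int) → List Int
  | _, [] => []
  | p, ab :: zs => (p + (ab.1 - ab.2)) :: ext (p + (ab.1 - ab.2)) zs

-- the common specification fold: running max of (index − first index of the same value in Q)
def Mstep (Q : List (Int × Int)) (a : Int) (x : Int × Int) : Int :=
  max a (x.2 - (firstAt x.1 Q).getD 0)

-- A's loop re-expressed as structural recursion over the list of (a, b) pairs, with k the
-- number of elements already consumed (so the current Python index is k + 1).
def goA : List (Int × Int) → Nat → (PySem.Dict Int Int × Int × Int) → Int
  | [], _, s => s.2.1
  | ab :: zs, k, s =>
      let p := s.2.2 + (ab.1 - ab.2)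
      match s.1.get? p with
      | none => goA zs (k + 1) (s.1.insert p ((k : Int) + 1), s.2.1, p)
      | some L => goA zs (k + 1) (s.1, max s.2.1 (((k : Int) + 1) - L), p)

lemma shiftA (nums1 nums2 : List Int) : ∀ (l1 l2 pre1 pre2 : List Int)
    (s : PySem.Dict Int Int × Int × Int),
    nums1 = pre1 ++ l1 → nums2 = pre2 ++ l2 → pre1.length = pre2.length →
    l1.length ≤ l2.length →
    ((PySem.List.pyRange ((pre1.length : Int) + 1) ((pre1.length : Int) + (l1.length : Int) + 1) 1).foldl
        (stepA nums1 nums2) s).2.1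
      = goA (l1.zip l2) pre1.length s := by
  intro l1
  induction l1 with
  | nil =>
      intro l2 pre1 pre2 s _ _ _ _
      have hempty : PySem.List.pyRange ((pre1.length : Int) + 1)
          ((pre1.length : Int) + ((0 : Nat) : Int) + 1) 1 = [] := by
        simp [PySem.List.pyRange]
      simp only [List.length_nil] at *
      rw [hempty]
      simp [goA]
  | cons a l1' ih =>
      intro l2 pre1 pre2 s h1 h2 hlen hle
      cases l2 with
      | nil => simp at hle
      | cons b l2' =>
          rw [PySem.List.pyRange_one_cons (by simp only [List.length_cons]; push_cast; omega)]
          rw [List.foldl_cons]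
          have hga : (PySem.List.pyGet? nums1 ((pre1.length : Int) + 1 - 1)).getD 0 = a := by
            rw [show ((pre1.length : Int) + 1 - 1) = (pre1.length : Int) by ring, h1,
              PySem.List.pyGet?_append_length]
            rfl
          have hgb : (PySem.List.pyGet? nums2 ((pre1.length : Int) + 1 - 1)).getD 0 = b := by
            rw [show ((pre1.length : Int) + 1 - 1) = (pre1.length : Int) by ring, hlen, h2,
              PySem.List.pyGet?_append_length]
            rfl
          have hrange : PySem.List.pyRange ((pre1.length : Int) + 1 + 1)
                ((pre1.length : Int) + ((a :: l1').length : Int) + 1) 1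
              = PySem.List.pyRange (((pre1 ++ [a]).length : Int) + 1)
                (((pre1 ++ [a]).length : Int) + ((l1').length : Int) + 1) 1 := by
            congr 1
            all_goals
              simp only [List.length_append, List.length_cons, List.length_nil]
              push_cast
              ring
          have hstep : stepA nums1 nums2 s ((pre1.length : Int) + 1)
              = (match s.1.get? (s.2.2 + (a - b)) with
                 | none => (s.1.insert (s.2.2 + (a - b)) ((pre1.length : Int) + 1), s.2.1, s.2.2 + (a - b))
                 | some L => (s.1, max s.2.1 (((pre1.length : Int) + 1) - L), s.2.2 + (a - b))) := by
            simp only [stepA, hga, hgb]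
          rw [hstep, hrange]
          have happ1 : nums1 = (pre1 ++ [a]) ++ l1' := by rw [h1]; simp
          have happ2 : nums2 = (pre2 ++ [b]) ++ l2' := by rw [h2]; simp
          have hlen' : (pre1 ++ [a]).length = (pre2 ++ [b]).length := by simp [hlen]
          have hle' : l1'.length ≤ l2'.length := by simpa using hle
          simp only [List.zip_cons_cons, goA]
          cases hg : s.1.get? (s.2.2 + (a - b)) with
          | none =>
              rw [ih l2' (pre1 ++ [a]) (pre2 ++ [b]) _ happ1 happ2 hlen' hle']
              simp
          | some L =>
              rw [ih l2' (pre1 ++ [a]) (pre2 ++ [b]) _ happ1 happ2 hlen' hle']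
              simp

-- Qaux structure
lemma Qaux_append (l1 l2 : List Int) (i : Int) :
    Qaux (l1 ++ l2) i = Qaux l1 i ++ Qaux l2 (i + (l1.length : Int)) := by
  induction l1 generalizing i with
  | nil => simp [Qaux]
  | cons p ps ih =>
      simp only [List.cons_append, Qaux, ih, List.length_cons]
      have : i + 1 + (ps.length : Int) = i + ((ps.length : Nat) + 1 : Nat) := by push_cast; ring
      rw [this]

lemma mem_Qaux_le {b : Int × Int} : ∀ {P : List Int} {j : Int}, b ∈ Qaux P j → j ≤ b.2 := by
  intro P
  induction P with
  | nil => intro j h; simp [Qaux] at h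
  | cons q qs ih =>
      intro j hm
      simp only [Qaux, List.mem_cons] at hm
      rcases hm with rfl | hm
      · simp
      · have := ih hm
        omega

lemma Qaux_snd_lt (P : List Int) (i : Int) :
    (Qaux P i).Pairwise (fun a b => a.2 < b.2) := by
  induction P generalizing i with
  | nil => simp [Qaux]
  | cons p ps ih =>
      refine List.Pairwise.cons ?_ (ih (i + 1))
      intro b hb
      have := mem_Qaux_le hb
      simp only
      omega

lemma firstAt_mem {v f : Int} {l : List (Int × Int)} (h : firstAt v l = some f) : (v, f) ∈ l := by
  unfold firstAt at h
  cases hf : l.find? (fun y => y.1 == v) with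
  | none => rw [hf] at h; simp at h
  | some x =>
      rw [hf] at h
      simp only [Option.map_some, Option.some.injEq] at h
      have hx := List.find?_some hf
      have hm := List.mem_of_find?_eq_some hf
      simp only [beq_iff_eq] at hx
      have : x = (v, f) := by
        cases x
        simp_all
      rwa [this] at hm

lemma firstAt_isSome {v j : Int} {l : List (Int × Int)} (h : (v, j) ∈ l) :
    (firstAt v l).isSome := by
  unfold firstAt
  rw [Option.isSome_map]
  rw [List.find?_isSome]
  exact ⟨(v, j), h, by simp⟩

lemma firstAt_le {P : List Int} {i v f j : Int} (h : firstAt v (Qaux P i) = some f)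
    (hj : (v, j) ∈ Qaux P i) : f ≤ j := by
  unfold firstAt at h
  cases hf : (Qaux P i).find? (fun y => y.1 == v) with
  | none => rw [hf] at h; simp at h
  | some x =>
      rw [hf] at h
      simp only [Option.map_some, Option.some.injEq] at h
      obtain ⟨hp, as, bs, heq, hno⟩ := List.find?_eq_some_iff_append.1 hf
      have hpw := Qaux_snd_lt P i
      rw [heq] at hpw hj
      rcases List.mem_append.1 hj with hja | hjb
      · have := hno _ hja
        simp at this
      · rcases List.mem_cons.1 hjb with hx | hjb
        · rw [← hx] at h; omega
        · have := (List.pairwise_append.1 hpw).2.1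
          have hlt := (List.pairwise_cons.1 this).1 _ hjb
          simp only at hlt
          omega

lemma firstAt_append (v : Int) (l1 l2 : List (Int × Int)) :
    firstAt v (l1 ++ l2) = (firstAt v l1).or (firstAt v l2) := by
  unfold firstAt
  rw [List.find?_append]
  cases l1.find? (fun y => y.1 == v) <;> simp

lemma firstAt_singleton_self (q j : Int) : firstAt q [(q, j)] = some j := by
  simp [firstAt, List.find?]

lemma firstAt_cons_self (v j : Int) (t : List (Int × Int)) :
    firstAt v ((v, j) :: t) = some j := by
  unfold firstAt
  rw [List.find?_cons_of_pos (by simp)]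
  rfl

lemma firstAt_singleton_ne {v q : Int} (j : Int) (h : v ≠ q) : firstAt v [(q, j)] = none := by
  simp only [firstAt, List.find?]
  rw [show (q == v) = false by simp [Ne.symm h]]
  rfl

-- ===== A-side: A's loop computes the Mstep-fold over the full pair list =====
lemma A_inv (Q : List (Int × Int)) : ∀ (zs : List (Int × Int)) (C : List Int) (k : Nat)
    (d : PySem.Dict Int Int) (w p : Int),
    C.length = k + 1 → C.getLast? = some p →
    Q = Qaux (C ++ ext p zs) 0 →
    (∀ v, d.get? v = firstAt v (Qaux C 0)) →
    w = (Qaux C 0).foldl (Mstep Q) 0 →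
    0 ≤ w →
    goA zs k (d, w, p) = Q.foldl (Mstep Q) 0 := by
  intro zs
  induction zs with
  | nil =>
      intro C k d w p hlen hlast hQ hd hw hw0
      simp only [ext, List.append_nil] at hQ
      simp only [goA]
      rw [hw, hQ]
  | cons ab zs ih =>
      intro C k d w p hlen hlast hQ hd hw hw0
      have hklen : (C.length : Int) = (k : Int) + 1 := by exact_mod_cast congrArg Nat.cast hlen
      have hCext : C ++ ext p (ab :: zs) = (C ++ [(p + (ab.1 - ab.2))]) ++ ext (p + (ab.1 - ab.2)) zs := by
        simp [ext]
      have hQC' : Qaux (C ++ [(p + (ab.1 - ab.2))]) 0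
          = Qaux C 0 ++ [((p + (ab.1 - ab.2)), (C.length : Int))] := by
        rw [Qaux_append]
        simp [Qaux]
      have hQsplit : Q = Qaux (C ++ [(p + (ab.1 - ab.2))]) 0
          ++ Qaux (ext (p + (ab.1 - ab.2)) zs) ((C ++ [(p + (ab.1 - ab.2))]).length : Int) := by
        rw [hQ, hCext, Qaux_append]
        simp
      have hlast' : (C ++ [(p + (ab.1 - ab.2))]).getLast? = some (p + (ab.1 - ab.2)) := by
        simp
      have hlen' : (C ++ [(p + (ab.1 - ab.2))]).length = (k + 1) + 1 := by
        simp [hlen]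
      have hQext : Q = Qaux ((C ++ [(p + (ab.1 - ab.2))]) ++ ext (p + (ab.1 - ab.2)) zs) 0 := by
        rw [hQ, hCext]
      simp only [goA]
      rw [hd (p + (ab.1 - ab.2))]
      cases hfq : firstAt (p + (ab.1 - ab.2)) (Qaux C 0) with
      | none =>
          -- the prefix value is new: first occurrence is the one we append now
          have hfQ : firstAt (p + (ab.1 - ab.2)) Q = some (C.length : Int) := by
            rw [hQsplit, firstAt_append, hQC', firstAt_append, hfq, firstAt_singleton_self]
            rfl
          have hknat : ((k : Int) + 1) = (C.length : Int) := hklen.symm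
          apply ih (C ++ [(p + (ab.1 - ab.2))]) (k + 1) _ _ _ hlen' hlast' hQext
          · intro v
            rw [PySem.Dict.get?_insert, hQC', firstAt_append]
            split
            · rename_i hv
              rw [hv, hfq, firstAt_singleton_self]
              simp [hknat]
            · rename_i hv
              rw [firstAt_singleton_ne _ hv, hd v]
              cases firstAt v (Qaux C 0) <;> rfl
          · rw [hQC', List.foldl_append]
            simp only [List.foldl_cons, List.foldl_nil, Mstep, hfQ]
            rw [hw]
            have : (C.length : Int) - (C.length : Int) = 0 := by ring
            simp only [Option.getD_some, this]
            omega
          · exact hw0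
      | some L =>
          have hfQ : firstAt (p + (ab.1 - ab.2)) Q = some L := by
            rw [hQsplit, firstAt_append, hQC', firstAt_append, hfq]
            rfl
          apply ih (C ++ [(p + (ab.1 - ab.2))]) (k + 1) _ _ _ hlen' hlast' hQext
          · intro v
            rw [hQC', firstAt_append, hd v]
            by_cases hv : v = p + (ab.1 - ab.2)
            · rw [hv, hfq]
              rfl
            · rw [firstAt_singleton_ne _ hv]
              cases firstAt v (Qaux C 0) <;> rfl
          · rw [hQC', List.foldl_append]
            simp only [List.foldl_cons, List.foldl_nil, Mstep, hfQ]
            rw [hw, hklen]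
            rfl
          · omega

-- ===== B-side =====
lemma buildPrefixes_go (zs : List (Int × Int)) : ∀ (acc : List Int) (h : acc ≠ []),
    zs.foldl (fun acc ab => acc ++ [PySem.List.pyGetD acc (-1) 0 + (ab.1 - ab.2)]) acc
      = acc ++ ext (acc.getLast h) zs := by
  induction zs with
  | nil => intro acc h; simp [ext]
  | cons ab zs ih =>
      intro acc h
      have hget : PySem.List.pyGetD acc (-1) 0 = acc.getLast h := PySem.List.pyGetD_neg_one acc 0 h
      simp only [List.foldl_cons, hget]
      rw [ih (acc ++ [acc.getLast h + (ab.1 - ab.2)]) (by simp)]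
      have hlast : (acc ++ [acc.getLast h + (ab.1 - ab.2)]).getLast (by simp)
          = acc.getLast h + (ab.1 - ab.2) := by
        simp
      rw [hlast]
      simp [ext]

lemma enumerate_swap (P : List Int) : ∀ (s : Int),
    (PySem.List.enumerate P s).map (fun ip => (ip.2, ip.1)) = Qaux P s := by
  induction P with
  | nil => intro s; simp [PySem.List.enumerate_nil, Qaux]
  | cons p ps ih =>
      intro s
      rw [PySem.List.enumerate_cons]
      simp only [List.map_cons, Qaux, ih]

lemma lexLe_trans {a b c : Int × Int} (h1 : lexLe a b) (h2 : lexLe b c) : lexLe a c := by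
  unfold lexLe at *
  omega

-- insertion sort produces a lexLe-sorted list
lemma pairwise_insertBy (before : Int × Int → Int × Int → Bool)
    (hbt : ∀ a b, before a b = true → lexLe a b)
    (hbf : ∀ a b, before a b = false → lexLe b a)
    (x : Int × Int) : ∀ (ys : List (Int × Int)), ys.Pairwise lexLe →
    (PySem.List.insertBy before x ys).Pairwise lexLe := by
  intro ys
  induction ys with
  | nil =>
      intro _
      simp [PySem.List.insertBy]
  | cons y ys ih =>
      intro hp
      rw [List.pairwise_cons] at hp
      simp only [PySem.List.insertBy]
      by_cases hb : before x y = true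
      · rw [if_pos hb]
        refine List.Pairwise.cons ?_ (List.Pairwise.cons hp.1 hp.2)
        intro b hb2
        rcases List.mem_cons.1 hb2 with rfl | hb3
        · exact hbt _ _ hb
        · exact lexLe_trans (hbt _ _ hb) (hp.1 _ hb3)
      · rw [if_neg hb]
        refine List.Pairwise.cons ?_ (ih hp.2)
        intro b hb2
        rcases (PySem.List.mem_insertBy before x b ys).1 hb2 with hbx | hb3
        · rw [hbx]
          exact hbf _ _ (by simpa using hb)
        · exact hp.1 _ hb3

lemma sorted2_pairwise_lexLe (xs : List (Int × Int)) :
    (PySem.List.sorted2 xs (fun x => x.1) (fun x => x.2) false).Pairwise lexLe := by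
  have hdef : PySem.List.sorted2 xs (fun x => x.1) (fun x => x.2) false
      = xs.foldl (fun acc y => PySem.List.insertBy
          (fun a b => decide (a.1 < b.1) || (!decide (b.1 < a.1) && decide (a.2 < b.2))) y acc) [] := rfl
  rw [hdef]
  have main : ∀ (l : List (Int × Int)) (acc : List (Int × Int)), acc.Pairwise lexLe →
      (l.foldl (fun acc y => PySem.List.insertBy
        (fun a b => decide (a.1 < b.1) || (!decide (b.1 < a.1) && decide (a.2 < b.2))) y acc) acc).Pairwise lexLe := by
    intro l
    induction l with
    | nil => intro acc h; exact h
    | cons x l ih =>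
        intro acc h
        refine ih _ (pairwise_insertBy _ ?_ ?_ x acc h)
        · intro a b hab
          simp at hab
          unfold lexLe
          omega
        · intro a b hab
          simp at hab
          unfold lexLe
          omega
  exact main xs [] List.Pairwise.nil

-- on a sorted permutation of Qaux P 0, the first element of each run is the value's
-- first (= smallest) index in the original pair list
lemma find?_sorted_first {P : List Int} {S : List (Int × Int)}
    (hperm : S.Perm (Qaux P 0)) (hsort : S.Pairwise lexLe) :
    ∀ (p : Int) (x : Int × Int), S.find? (fun y => y.1 == p) = some x →
      firstAt x.1 (Qaux P 0) = some x.2 := by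
  intro p x hfind
  obtain ⟨px, as, bs, heq, hno⟩ := List.find?_eq_some_iff_append.1 hfind
  simp only [beq_iff_eq] at px
  have hxQ : x ∈ Qaux P 0 := hperm.mem_iff.1 (List.mem_of_find?_eq_some hfind)
  have hxQ' : (x.1, x.2) ∈ Qaux P 0 := by simpa using hxQ
  have hsome := firstAt_isSome hxQ'
  obtain ⟨f, hf⟩ := Option.isSome_iff_exists.1 hsome
  have hle1 : f ≤ x.2 := firstAt_le hf hxQ'
  have hmemf : (x.1, f) ∈ Qaux P 0 := firstAt_mem hf
  have hmemfS : (x.1, f) ∈ S := hperm.mem_iff.2 hmemf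
  rw [heq] at hmemfS hsort
  have hle2 : x.2 ≤ f := by
    rcases List.mem_append.1 hmemfS with ha | hb
    · have := hno _ ha
      simp [px] at this
    · rcases List.mem_cons.1 hb with hx | hb
      · rw [Prod.ext_iff] at hx
        simp only at hx
        omega
      · have hpw := (List.pairwise_append.1 hsort).2.1
        have hrel := (List.pairwise_cons.1 hpw).1 _ hb
        unfold lexLe at hrel
        simp only at hrel
        omega
  have : f = x.2 := by omega
  rw [← this, hf]

-- B's scan over the sorted tail equals the Mstep-fold over it
lemma scan_fold (Q : List (Int × Int)) :
    ∀ (l : List (Int × Int)) (best v f : Int),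
    0 ≤ best →
    ((v, f) :: l).Pairwise lexLe →
    firstAt v Q = some f →
    (∀ p x, p ≠ v → l.find? (fun y => y.1 == p) = some x → firstAt x.1 Q = some x.2) →
    (l.foldl (fun s x =>
        if x.1 == s.2.1 then (max s.1 (x.2 - s.2.2), s.2.1, s.2.2)
        else (s.1, x.1, x.2)) (best, v, f)).1
      = l.foldl (Mstep Q) best := by
  intro l
  induction l with
  | nil => intro best v f _ _ _ _; rfl
  | cons x l ih =>
      intro best v f hb0 hsort hfv hHF
      obtain ⟨x1, x2⟩ := x
      by_cases hx : x1 = v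
      · subst hx
        simp only [List.foldl_cons]
        rw [if_pos (by simp)]
        have hstep : Mstep Q best (x1, x2) = max best (x2 - f) := by
          simp [Mstep, hfv]
        rw [hstep]
        apply ih (max best (x2 - f)) x1 f (by omega) ?_ hfv ?_
        · rw [List.pairwise_cons] at hsort ⊢
          refine ⟨fun b hbm => hsort.1 _ (List.mem_cons_of_mem _ hbm), ?_⟩
          exact (List.pairwise_cons.1 hsort.2).2
        · intro p y hp hfind
          refine hHF p y hp ?_
          rw [List.find?_cons_of_neg (by simp [Ne.symm hp])]
          exact hfind
      · simp only [List.foldl_cons]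
        rw [if_neg (by simp [hx])]
        have hfx : firstAt x1 Q = some x2 := by
          have := hHF x1 (x1, x2) hx (by rw [List.find?_cons_of_pos (by simp)])
          simpa using this
        have hstep : Mstep Q best (x1, x2) = best := by
          simp only [Mstep, hfx, Option.getD_some]
          omega
        rw [hstep]
        have hsort' : ((x1, x2) :: l).Pairwise lexLe := (List.pairwise_cons.1 hsort).2
        have hvx : v < x1 := by
          have := (List.pairwise_cons.1 hsort).1 _ (List.mem_cons_self)
          unfold lexLe at this
          simp only at this
          omega
        apply ih best x1 x2 hb0 hsort' hfx
        intro p y hp hfind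
        by_cases hpv : p = v
        · exfalso
          have hy := List.find?_some hfind
          have hym := List.mem_of_find?_eq_some hfind
          simp only [beq_iff_eq] at hy
          have := (List.pairwise_cons.1 hsort').1 _ hym
          unfold lexLe at this
          simp only at this
          omega
        · refine hHF p y hpv ?_
          rw [List.find?_cons_of_neg (by simp [Ne.symm hp])]
          exact hfind

-- the Mstep-fold is invariant under permutation (running max of per-element quantities)
lemma Mfold_perm (Q : List (Int × Int)) {l1 l2 : List (Int × Int)} (h : l1.Perm l2)
    (b : Int) : l1.foldl (Mstep Q) b = l2.foldl (Mstep Q) b := by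
  refine List.Perm.foldl_eq' h ?_ b
  intro x _ y _ z
  simp only [Mstep]
  exact max_right_comm z _ _

-- ===== VERDICT (by name: the statement is the Claim_ definition above) =====
theorem widestPairOfIndices_spec : Claim_equal_widestPairOfIndices := by
  intro n1 n2 _ hpre
  unfold Spec_widestPairOfIndices widestPairOfIndices widestPairOfIndices_alt
  unfold Pre_widestPairOfIndices at hpre
  -- A's loop as structural recursion over the zipped pairs
  have hA := shiftA n1 n2 n1 n2 [] [] (PySem.Dict.ofList [(0, 0)], 0, 0)
    (by simp) (by simp) rfl hpre
  simp only [List.length_nil, Nat.cast_zero, zero_add] at hA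
  rw [hA]
  -- the full prefix list and its pair list
  have hP : buildPrefixes (n1.zip n2) = [0] ++ ext 0 (n1.zip n2) := by
    unfold buildPrefixes
    rw [buildPrefixes_go (n1.zip n2) [0] (by simp)]
    rfl
  -- A computes the Mstep-fold over Q
  have hQ0 : firstAt 0 (Qaux (([0] : List Int) ++ ext 0 (n1.zip n2)) 0) = some 0 := by
    simp only [List.cons_append, List.nil_append, Qaux]
    exact firstAt_cons_self 0 0 _
  have hAQ : goA (n1.zip n2) 0 (PySem.Dict.ofList [(0, 0)], 0, 0)
      = (Qaux (([0] : List Int) ++ ext 0 (n1.zip n2)) 0).foldl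
          (Mstep (Qaux (([0] : List Int) ++ ext 0 (n1.zip n2)) 0)) 0 := by
    apply A_inv _ (n1.zip n2) [0] 0 _ 0 0 rfl rfl rfl
    · intro v
      by_cases hv : v = 0
      · subst hv
        have : (PySem.Dict.ofList [((0 : Int), (0 : Int))]).get? 0 = some 0 := by decide
        rw [this]
        simp only [Qaux]
        rw [firstAt_cons_self]
      · have h1 : (PySem.Dict.ofList [((0 : Int), (0 : Int))]).get? v = none := by
          change (PySem.Dict.empty.insert (0 : Int) (0 : Int)).get? v = none
          rw [PySem.Dict.get?_insert]
          rw [if_neg (by simpa using hv)]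
          simp [PySem.Dict.get?_empty]
        rw [h1]
        simp only [Qaux]
        rw [firstAt_singleton_ne _ hv]
    · simp only [Qaux, List.foldl_cons, List.foldl_nil, Mstep, hQ0]
      simp
    · omega
  -- B's side: the sorted pair list
  have hQdef' : (PySem.List.enumerate (([0] : List Int) ++ ext 0 (n1.zip n2)) 0).map
      (fun ip => (ip.2, ip.1)) = Qaux (([0] : List Int) ++ ext 0 (n1.zip n2)) 0 :=
    enumerate_swap _ 0
  rw [hAQ, hP, hQdef']
  have hSperm := PySem.List.sorted2_perm (Qaux (([0] : List Int) ++ ext 0 (n1.zip n2)) 0)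
    (fun x => x.1) (fun x => x.2) false
  have hSsort := sorted2_pairwise_lexLe (Qaux (([0] : List Int) ++ ext 0 (n1.zip n2)) 0)
  cases hS : PySem.List.sorted2 (Qaux (([0] : List Int) ++ ext 0 (n1.zip n2)) 0)
      (fun x => x.1) (fun x => x.2) false with
  | nil =>
      exfalso
      rw [hS] at hSperm
      have := hSperm.length_eq
      simp [Qaux] at this
  | cons vf rest =>
      obtain ⟨v, f⟩ := vf
      rw [hS] at hSperm hSsort
      have hfirst := find?_sorted_first hSperm hSsort
      have hfv : firstAt v (Qaux (([0] : List Int) ++ ext 0 (n1.zip n2)) 0) = some f := by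
        have := hfirst v (v, f) (by rw [List.find?_cons_of_pos (by simp)])
        simpa using this
      have hscan := scan_fold (Qaux (([0] : List Int) ++ ext 0 (n1.zip n2)) 0) rest 0 v f
        le_rfl hSsort hfv ?_
      · show List.foldl (Mstep (Qaux (([0] : List Int) ++ ext 0 (n1.zip n2)) 0)) 0
            (Qaux (([0] : List Int) ++ ext 0 (n1.zip n2)) 0)
          = (List.foldl (fun s x =>
              if x.1 == s.2.1 then (max s.1 (x.2 - s.2.2), s.2.1, s.2.2)
              else (s.1, x.1, x.2)) ((0 : Int), v, f) rest).1
        rw [hscan]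
        have hfold : ((v, f) :: rest).foldl
            (Mstep (Qaux (([0] : List Int) ++ ext 0 (n1.zip n2)) 0)) 0
            = rest.foldl (Mstep (Qaux (([0] : List Int) ++ ext 0 (n1.zip n2)) 0)) 0 := by
          simp only [List.foldl_cons, Mstep, hfv, Option.getD_some]
          congr 1
          omega
        rw [← hfold]
        exact Mfold_perm _ hSperm.symm 0
      · intro p x hp hfind
        refine hfirst p x ?_
        rw [List.find?_cons_of_neg (by simp [Ne.symm hp])]
        exact hfind
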